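-- pv_equiv track=rewrite | github.com/shreyshah97/CSCI-561-Foundations-of-Artificial-Intelligence | Homework 3/homework.py | distribute_and_over_or
-- ===== SOURCE A (Python) =====
-- import copy
--
-- def distribute_and_over_or(rule, right):
--     cnf_rules, rule = [], rule.replace('~~', '')
--     if (right):
--         cnf_rules = [rule.strip() + ' | ' + right for rule in rule.split('&')]
--     else:
--         new_rules = []
--         for r in rule.split('|'):
--             if ('&' in r):
--                 new_rules.append([i.strip() for i in r.strip().split('&')])
--             else:
--                 new_rules.append([r.strip()])
--
--         def generate_subset_combinations(new_rules, temp):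
--             if (len(temp) == len(new_rules)):
--                 cnf_rules.append(copy.deepcopy(temp))
--                 return
--             for i in new_rules[len(temp)]:
--                 temp.append(i)
--                 generate_subset_combinations(new_rules, temp)
--                 temp.pop()
--
--         generate_subset_combinations(new_rules, [])
--         cnf_rules = [' | '.join(rule) for rule in cnf_rules]
--     return cnf_rules
-- ===== SOURCE B (Python) =====
-- def distribute_and_over_or(rule, right):
--     rule = rule.replace('~~', '')
--     if right:
--         return [part.strip() + ' | ' + right for part in rule.split('&')]
--     combos = None
--     for r in rule.split('|'):
--         group = [p.strip() for p in r.strip().split('&')] if '&' in r else [r.strip()]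
--         combos = group if combos is None else [c + ' | ' + x for c in combos for x in group]
--     return combos
-- ===== Notes on version B (the rewrite author's own statement) =====
-- stated objective: simpler
-- what changed: Replaces A's recursive generate_subset_combinations helper (global accumulator, temp list with append/pop, deepcopy) and the final ' | '.join pass by one forward fold over the disjuncts that cross-combines already-joined clause strings directly, never materialising the list-of-lists of combinations.
import Mathlib
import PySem

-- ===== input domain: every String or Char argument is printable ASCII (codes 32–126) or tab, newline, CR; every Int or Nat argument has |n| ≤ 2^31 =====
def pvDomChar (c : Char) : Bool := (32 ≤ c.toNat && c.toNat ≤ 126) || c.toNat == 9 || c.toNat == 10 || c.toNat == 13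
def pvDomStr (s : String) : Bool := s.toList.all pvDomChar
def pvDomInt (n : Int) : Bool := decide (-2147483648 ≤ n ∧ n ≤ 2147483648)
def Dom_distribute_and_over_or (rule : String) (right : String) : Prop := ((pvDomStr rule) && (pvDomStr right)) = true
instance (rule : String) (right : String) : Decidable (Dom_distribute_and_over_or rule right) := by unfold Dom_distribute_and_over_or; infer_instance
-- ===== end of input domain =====

-- B replaces A's recursive accumulator helper (deepcopy, temp append/pop, final join pass) by one
-- forward fold that builds the joined clause strings directly, with no list-of-lists and no join step;
-- objective: simpler, same result in the same order.


-- ===== PORT A =====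
-- A's nested helper generate_subset_combinations: recursion with a growing temp,
-- the global cnf_rules accumulation rendered as the foldl-appended results in loop order.
def pvGenA : List (List String) → List String → List (List String)
  | [], temp => [temp]
  | g :: rest, temp => g.foldl (fun acc i => acc ++ pvGenA rest (temp ++ [i])) []

def distribute_and_over_or (rule : String) (right : String) : List String :=
  let rule := PySem.Str.replace rule "~~" ""
  if right ≠ "" then
    ((PySem.Str.split? rule "&").getD []).map (fun r => PySem.Str.strip r ++ " | " ++ right)
  else
    let new_rules := ((PySem.Str.split? rule "|").getD []).map (fun r =>
      if PySem.Str.isIn "&" r then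
        ((PySem.Str.split? (PySem.Str.strip r) "&").getD []).map PySem.Str.strip
      else [PySem.Str.strip r])
    (pvGenA new_rules []).map (fun c => PySem.Str.join " | " c)

-- ===== PORT B =====
def distribute_and_over_or_alt (rule : String) (right : String) : List String :=
  let rule := PySem.Str.replace rule "~~" ""
  if right ≠ "" then
    ((PySem.Str.split? rule "&").getD []).map (fun part => PySem.Str.strip part ++ " | " ++ right)
  else
    -- combos = None; for r in rule.split('|'): group = …; combos = group if combos is None
    --                                          else [c + ' | ' + x for c in combos for x in group]
    (((PySem.Str.split? rule "|").getD []).foldl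
      (fun combos r =>
        let group :=
          if PySem.Str.isIn "&" r then
            ((PySem.Str.split? (PySem.Str.strip r) "&").getD []).map PySem.Str.strip
          else [PySem.Str.strip r]
        some (match combos with
          | none => group
          | some cs => cs.flatMap (fun c => group.map (fun x => c ++ " | " ++ x))))
      none).getD []

-- ===== PRECONDITION & SPEC =====
def Spec_distribute_and_over_or (rule : String) (right : String) (out : List String) : Prop := out = distribute_and_over_or_alt rule right
instance (rule : String) (right : String) (out : List String) : Decidable (Spec_distribute_and_over_or rule right out) := by unfold Spec_distribute_and_over_or; infer_instance

-- ===== CLAIM (what is proved, stated in full; the proofs are below) =====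
def Claim_equal_distribute_and_over_or : Prop := ∀ (rule : String) (right : String), Dom_distribute_and_over_or rule right → Spec_distribute_and_over_or rule right (distribute_and_over_or rule right)

-- ===== LEMMAS AND PROOFS =====

-- the group a disjunct r contributes (the shared inner comprehension of both Pythons)
def pvG (r : String) : List String :=
  if PySem.Str.isIn "&" r then
    ((PySem.Str.split? (PySem.Str.strip r) "&").getD []).map PySem.Str.strip
  else [PySem.Str.strip r]

-- the Cartesian product of the groups, last group varying fastest
def pvProd (groups : List (List String)) : List (List String) :=
  groups.foldr (fun g acc => g.flatMap (fun x => acc.map (x :: ·))) [[]]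

-- left-to-right ' | '-joining starting from an already-joined prefix
def pvExt (c : String) (t : List String) : String :=
  t.foldl (fun s x => s ++ " | " ++ x) c

-- A's recursion computes the Cartesian product, each combination prefixed by temp.
theorem pvGenA_eq_prod (groups : List (List String)) (temp : List String) :
    pvGenA groups temp = (pvProd groups).map (temp ++ ·) := by
  induction groups generalizing temp with
  | nil => simp [pvGenA, pvProd]
  | cons g rest ih =>
      simp only [pvGenA, pvProd, List.foldr_cons]
      rw [PySem.List.foldl_append_eq_flatMap]
      simp [ih, pvProd, List.map_flatMap, List.map_map, Function.comp_def]

theorem pvExt_append (t : List String) (a b : String) :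
    pvExt (a ++ b) t = a ++ pvExt b t := by
  induction t generalizing b with
  | nil => rfl
  | cons y t ih =>
      show pvExt ((a ++ b) ++ " | " ++ y) t = a ++ pvExt (b ++ " | " ++ y) t
      rw [← ih (b ++ " | " ++ y)]
      simp [String.append_assoc]

-- Python's ' | '.join equals the left-to-right concatenation pvExt.
theorem join_eq_pvExt (t : List String) (x : String) :
    PySem.Str.join " | " (x :: t) = pvExt x t := by
  induction t generalizing x with
  | nil =>
      apply String.toList_inj.mp
      simp [PySem.Str.toList_join, PySem.Chars.join_singleton, pvExt]
  | cons y t ih =>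
      have h : PySem.Str.join " | " (x :: y :: t) = x ++ " | " ++ PySem.Str.join " | " (y :: t) := by
        apply String.toList_inj.mp
        simp [PySem.Str.toList_join, PySem.Chars.join_cons_cons]
      rw [h, ih y]
      show x ++ " | " ++ pvExt y t = pvExt (x ++ " | " ++ y) t
      rw [pvExt_append t (x ++ " | ") y]

-- B's string-building fold is the join of the Cartesian product of the groups.
theorem foldl_bstep_eq (G : String → List String) (rs : List String) (cs : List String) :
    rs.foldl (fun cs r => cs.flatMap (fun c => (G r).map (fun x => c ++ " | " ++ x))) cs
      = cs.flatMap (fun c => (pvProd (rs.map G)).map (pvExt c)) := by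
  induction rs generalizing cs with
  | nil => simp [pvProd, pvExt]
  | cons r rs ih =>
      simp only [List.foldl_cons, ih, List.map_cons]
      show _ = cs.flatMap (fun c =>
        ((G r).flatMap (fun x => (pvProd (rs.map G)).map (x :: ·))).map (pvExt c))
      simp only [List.flatMap_assoc, List.flatMap_map]
      congr 1
      funext c
      rw [List.map_flatMap]
      congr 1
      funext a
      rw [List.map_map]
      rfl

-- the Option layer of B's fold: once seeded, it is the plain fold
theorem foldl_opt_eq (G : String → List String) (rs : List String) (cs : List String) :
    rs.foldl
      (fun combos r =>
        some (match combos with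
          | none => G r
          | some cs => cs.flatMap (fun c => (G r).map (fun x => c ++ " | " ++ x))))
      (some cs)
      = some (rs.foldl (fun cs r => cs.flatMap (fun c => (G r).map (fun x => c ++ " | " ++ x))) cs) := by
  induction rs generalizing cs with
  | nil => rfl
  | cons r rs ih => simp only [List.foldl_cons, ih]

-- B's whole fold on a nonempty disjunct list, seeded with None
theorem foldl_opt_cons (G : String → List String) (p : String) (rest : List String) :
    (((p :: rest).foldl
      (fun combos r =>
        some (match combos with
          | none => G r
          | some cs => cs.flatMap (fun c => (G r).map (fun x => c ++ " | " ++ x))))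
      none).getD [])
      = (G p).flatMap (fun c => (pvProd (rest.map G)).map (pvExt c)) := by
  have h : (p :: rest).foldl
      (fun combos r =>
        some (match combos with
          | none => G r
          | some cs => cs.flatMap (fun c => (G r).map (fun x => c ++ " | " ++ x))))
      none
    = rest.foldl
      (fun combos r =>
        some (match combos with
          | none => G r
          | some cs => cs.flatMap (fun c => (G r).map (fun x => c ++ " | " ++ x))))
      (some (G p)) := rfl
  rw [h, foldl_opt_eq G rest (G p), Option.getD_some, foldl_bstep_eq G rest (G p)]

-- splitOn never returns the empty list (both exits of go cons onto the accumulator)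
theorem splitOn_go_ne_nil (sep : List Char) (fuel : Nat) :
    ∀ (l cur : List Char) (acc : List (List Char)),
      PySem.Chars.splitOn.go sep fuel l cur acc ≠ [] := by
  induction fuel with
  | zero =>
      intro l cur acc
      have : PySem.Chars.splitOn.go sep 0 l cur acc = ((cur.reverse ++ l) :: acc).reverse := rfl
      simp [this]
  | succ fuel ih =>
      intro l cur acc
      cases l with
      | nil =>
          have : PySem.Chars.splitOn.go sep (fuel + 1) [] cur acc
              = (cur.reverse :: acc).reverse := rfl
          simp [this]
      | cons c rest =>
          have : PySem.Chars.splitOn.go sep (fuel + 1) (c :: rest) cur acc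
              = if sep.isPrefixOf (c :: rest) = true then
                  PySem.Chars.splitOn.go sep fuel ((c :: rest).drop sep.length) [] (cur.reverse :: acc)
                else
                  PySem.Chars.splitOn.go sep fuel rest (c :: cur) acc := rfl
          rw [this]
          split_ifs <;> exact ih _ _ _

theorem split_bar_ne_nil (s : String) :
    (PySem.Str.split? s "|").getD [] ≠ [] := by
  have h1 : PySem.Str.split? s "|" = some ((PySem.Chars.splitOn s.toList ['|']).map String.ofList) := by
    simp [PySem.Str.split?, PySem.Chars.split?]
  intro h
  rw [h1] at h
  simp only [Option.getD_some, List.map_eq_nil_iff] at h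
  exact splitOn_go_ne_nil ['|'] _ _ _ _ (by simpa [PySem.Chars.splitOn] using h)

-- the whole else branch: A's product-then-join equals B's joining fold
theorem pv_else_eq (r0 : String) :
    (pvGenA (((PySem.Str.split? r0 "|").getD []).map pvG) []).map (fun c => PySem.Str.join " | " c)
      = ((((PySem.Str.split? r0 "|").getD []).foldl
          (fun combos r =>
            some (match combos with
              | none => pvG r
              | some cs => cs.flatMap (fun c => (pvG r).map (fun x => c ++ " | " ++ x))))
          none).getD []) := by
  obtain ⟨p, rest, hps⟩ : ∃ p rest, (PySem.Str.split? r0 "|").getD [] = p :: rest := by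
    cases hps : (PySem.Str.split? r0 "|").getD [] with
    | nil => exact absurd hps (split_bar_ne_nil r0)
    | cons p rest => exact ⟨p, rest, rfl⟩
  rw [hps, List.map_cons, pvGenA_eq_prod, foldl_opt_cons pvG p rest]
  rw [show pvProd (pvG p :: rest.map pvG)
      = (pvG p).flatMap (fun x => (pvProd (rest.map pvG)).map (x :: ·)) from rfl]
  simp only [List.map_flatMap, List.map_map, Function.comp_def, List.nil_append, join_eq_pvExt]

-- ===== VERDICT (by name: the statement is the Claim_ definition above) =====
theorem distribute_and_over_or_spec : Claim_equal_distribute_and_over_or := by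
  intro rule right _
  unfold Spec_distribute_and_over_or distribute_and_over_or distribute_and_over_or_alt
  split_ifs with h
  · rfl
  · exact pv_else_eq (PySem.Str.replace rule "~~" "")
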